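-- pv_equiv track=rewrite | github.com/SonyCSLParis/ATS_it | src/data/data_processing/preprocess_data.py | adjust_number
-- ===== SOURCE A (Python) =====
-- def adjust_number(sentence1, sentence2):
--     '''
--     This function allows you to correct errors within number-related sentences.
--     Most of the sentences had causal numbers that were not homologous between the original and simple sentences.
--     :param sentence1: complex sentence in input
--     :param sentence2: simple sentence in input
--     :return: complex and simple - parallel sentence corrected
--     '''
--     cc = sentence1.split()
--     ss = sentence2.split()
--
--     lista_numeri_complessa = []
--
--     # I save the numbers I encounter in the complex sentence
--     for j in range(len(cc)):
--
--         if cc[j].isdigit():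
--             lista_numeri_complessa.append(cc[j])
--
--     numeri_complessi = list(reversed(lista_numeri_complessa))
--
--     if numeri_complessi != []:
--
--         # I correct the numbers in the simplified sentence
--         for j in range(len(ss)):
--
--             if ss[j].isdigit():
--                 if len(numeri_complessi) != 0:
--                     ele = numeri_complessi.pop()
--                     ss[j] = ele
--
--     frase_semplice = ' '.join(ss)
--
--     return sentence1.strip(), frase_semplice.strip()
-- ===== SOURCE B (Python) =====
-- def adjust_number(sentence1, sentence2):
--     nums = [t for t in sentence1.split() if t.isdigit()]
--     toks = sentence2.split()
--     k = sum(t.isdigit() for t in toks)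
--     out = []
--     for tok in reversed(toks):
--         if tok.isdigit():
--             k -= 1
--             tok = nums[k] if k < len(nums) else tok
--         out.append(tok)
--     out.reverse()
--     return sentence1.strip(), ' '.join(out).strip()
-- ===== Notes on version B (the rewrite author's own statement) =====
-- stated objective: alternative
-- what changed: A consumes the complex-side numbers as a mutable queue (reversed copy + pop) while scanning the simple sentence forward and assigning in place; B never consumes anything: it counts the simple-side digit tokens, then traverses the token list in reverse building the output back-to-front, selecting each replacement by a countdown position index (random access nums[k]) instead of queue consumption.
import Mathlib
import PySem

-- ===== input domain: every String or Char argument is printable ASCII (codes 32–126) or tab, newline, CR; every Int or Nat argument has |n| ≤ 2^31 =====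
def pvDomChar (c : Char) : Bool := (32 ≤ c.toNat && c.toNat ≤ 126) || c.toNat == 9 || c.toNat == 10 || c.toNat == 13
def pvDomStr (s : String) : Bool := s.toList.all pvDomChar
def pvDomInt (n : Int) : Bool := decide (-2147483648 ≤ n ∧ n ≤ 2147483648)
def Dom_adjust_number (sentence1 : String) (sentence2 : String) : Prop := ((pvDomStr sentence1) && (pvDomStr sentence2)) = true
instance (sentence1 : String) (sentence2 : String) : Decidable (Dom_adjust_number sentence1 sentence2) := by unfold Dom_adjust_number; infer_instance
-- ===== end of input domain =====

-- B replaces A's forward scan with in-place assignment from a mutable reversed-copy-and-pop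
-- queue by a reverse traversal that builds the output back-to-front, choosing each
-- replacement by a countdown position index into the number list (objective: alternative).

-- ===== PORT A =====
def adjust_number (sentence1 : String) (sentence2 : String) : String × String :=
  let cc := PySem.Str.split₀ sentence1
  let ss := PySem.Str.split₀ sentence2
  let lista_numeri_complessa :=
    (PySem.List.pyRange 0 (cc.length : Int) 1).foldl
      (fun acc j =>
        if PySem.Str.strIsdigit (PySem.List.pyGetD cc j "") then
          acc ++ [PySem.List.pyGetD cc j ""]
        else acc) []
  let numeri_complessi := lista_numeri_complessa.reverse
  let ss' :=
    if numeri_complessi ≠ [] then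
      ((PySem.List.pyRange 0 (ss.length : Int) 1).foldl
        (fun st j =>
          if PySem.Str.strIsdigit (PySem.List.pyGetD st.2 j "") then
            if st.1.length ≠ 0 then
              match PySem.List.pop? st.1 (-1) with
              | some (ele, rest) => (rest, PySem.List.pySetD st.2 j ele)
              | none => st
            else st
          else st)
        (numeri_complessi, ss)).2
    else ss
  (PySem.Str.strip sentence1, PySem.Str.strip (PySem.Str.join " " ss'))

-- ===== PORT B =====
def adjust_number_alt (sentence1 : String) (sentence2 : String) : String × String :=
  let nums := (PySem.Str.split₀ sentence1).filter PySem.Str.strIsdigit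
  let toks := PySem.Str.split₀ sentence2
  let k0 : Int := toks.foldl (fun acc t => acc + (if PySem.Str.strIsdigit t then 1 else 0)) 0
  let st := toks.reverse.foldl
    (fun (st : Int × List String) tok =>
      if PySem.Str.strIsdigit tok then
        let k' := st.1 - 1
        (k', st.2 ++ [if k' < (nums.length : Int) then PySem.List.pyGetD nums k' tok else tok])
      else (st.1, st.2 ++ [tok]))
    (k0, [])
  let out := st.2.reverse
  (PySem.Str.strip sentence1, PySem.Str.strip (PySem.Str.join " " out))

-- ===== PRECONDITION & SPEC =====
def Spec_adjust_number (sentence1 : String) (sentence2 : String) (out : String × String) : Prop := out = adjust_number_alt sentence1 sentence2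
instance (sentence1 : String) (sentence2 : String) (out : String × String) : Decidable (Spec_adjust_number sentence1 sentence2 out) := by unfold Spec_adjust_number; infer_instance

-- ===== CLAIM (what is proved, stated in full; the proofs are below) =====
def Claim_equal_adjust_number : Prop := ∀ (sentence1 : String) (sentence2 : String), Dom_adjust_number sentence1 sentence2 → Spec_adjust_number sentence1 sentence2 (adjust_number sentence1 sentence2)

-- ===== LEMMAS AND PROOFS =====

-- common specification: replace the digit tokens of the first list by the numbers of the
-- second list, in order, stopping when the numbers run out, leaving the rest unchanged
def repl : List String → List String → List String
  | [], _ => []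
  | t :: ts, ns =>
    if PySem.Str.strIsdigit t then
      match ns with
      | [] => t :: repl ts []
      | n :: ns' => n :: repl ts ns'
    else t :: repl ts ns

theorem repl_nil (ts : List String) : repl ts [] = ts := by
  induction ts with
  | nil => rfl
  | cons t ts ih => simp [repl, ih]

theorem hget (pre : List String) (t : String) (ts : List String) :
    PySem.List.pyGetD (pre ++ t :: ts) ((pre.length : Int)) "" = t := by
  induction pre with
  | nil => simp [PySem.List.pyGetD_zero_cons]
  | cons p ps ih =>
    have : ((ps.length + 1 : Nat) : Int) = ((ps.length : Nat) : Int) + 1 := by push_cast; ring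
    simp only [List.cons_append, List.length_cons, this]
    rw [show ((ps.length : Int) + 1) = (((ps.length + 1 : Nat)) : Int) by push_cast; ring]
    rw [PySem.List.pyGetD_natCast] at *
    exact ih

theorem hset (pre : List String) (t : String) (ts : List String) (v : String) :
    PySem.List.pySetD (pre ++ t :: ts) ((pre.length : Int)) v = pre ++ v :: ts := by
  rw [PySem.List.pySetD_natCast]
  induction pre with
  | nil => simp
  | cons p ps ih =>
    simp only [List.cons_append, List.length_cons, List.set_cons_succ, List.cons_inj_right]
    exact ih

theorem loopA (cur : List String) : ∀ (pre ns : List String),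
    ((PySem.List.pyRange (pre.length : Int) ((pre.length : Int) + (cur.length : Int)) 1).foldl
      (fun st j =>
        if PySem.Str.strIsdigit (PySem.List.pyGetD st.2 j "") then
          if st.1.length ≠ 0 then
            match PySem.List.pop? st.1 (-1) with
            | some (ele, rest) => (rest, PySem.List.pySetD st.2 j ele)
            | none => st
          else st
        else st)
      (ns.reverse, pre ++ cur)).2 = pre ++ repl cur ns := by
  induction cur with
  | nil =>
    intro pre ns
    rw [PySem.List.pyRange_one_eq_nil (by simp)]
    simp [repl]
  | cons t ts ih =>
    intro pre ns
    simp only [List.length_cons, Nat.cast_add, Nat.cast_one]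
    rw [PySem.List.pyRange_one_cons (by omega)]
    rw [show ((pre.length : Int) + ((ts.length : Int) + 1)) = (pre.length : Int) + 1 + (ts.length : Int) from by ring]
    simp only [List.foldl_cons, hget]
    by_cases hd : PySem.Str.strIsdigit t
    · cases ns with
      | nil =>
        have h2 := ih (pre ++ [t]) []
        simp only [List.reverse_nil, List.append_assoc, List.singleton_append,
          List.length_append, List.length_singleton] at h2
        push_cast at h2
        simp only [hd, if_true, List.reverse_nil, List.length_nil, ne_eq, not_true_eq_false,
          if_false]
        rw [h2]
        simp only [repl, hd, if_true]
      | cons n ns' =>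
        have hpop : PySem.List.pop? ((n :: ns').reverse) (-1) = some (n, ns'.reverse) := by
          rw [List.reverse_cons, PySem.List.pop?_last]
        have h2 := ih (pre ++ [n]) ns'
        simp only [List.append_assoc, List.singleton_append,
          List.length_append, List.length_singleton] at h2
        push_cast at h2
        simp only [hd, if_true, List.reverse_cons, List.length_append, List.length_reverse,
          List.length_singleton, ne_eq]
        rw [if_pos (by omega), ← List.reverse_cons, hpop]
        simp only [hset]
        rw [h2]
        simp only [repl, hd, if_true]
    · have h2 := ih (pre ++ [t]) ns
      simp only [List.append_assoc, List.singleton_append,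
        List.length_append, List.length_singleton] at h2
      push_cast at h2
      simp only [hd, Bool.false_eq_true, if_false]
      rw [h2]
      simp only [repl, hd, Bool.false_eq_true, if_false]

theorem lista_eq_filter (cc : List String) :
    (PySem.List.pyRange 0 (cc.length : Int) 1).foldl
      (fun acc j =>
        if PySem.Str.strIsdigit (PySem.List.pyGetD cc j "") then
          acc ++ [PySem.List.pyGetD cc j ""]
        else acc) [] = cc.filter PySem.Str.strIsdigit := by
  rw [show ((cc.length : Nat) : Int) = PySem.List.len cc from (PySem.List.len_eq cc).symm]
  rw [PySem.List.foldl_pyRange_zero_pyGetD cc ""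
    (fun acc t => if PySem.Str.strIsdigit t then acc ++ [t] else acc) []]
  suffices h : ∀ (cc : List String) (acc : List String),
      cc.foldl (fun acc t => if PySem.Str.strIsdigit t then acc ++ [t] else acc) acc
        = acc ++ cc.filter PySem.Str.strIsdigit by
    simpa using h cc []
  intro cc acc
  induction cc generalizing acc with
  | nil => simp
  | cons x xs ih =>
    simp only [List.foldl_cons, List.filter_cons]
    by_cases hd : PySem.Str.strIsdigit x
    · simp only [hd, if_true, ih]
      simp
    · simp only [hd, Bool.false_eq_true, if_false, ih]

-- B-side characterisation: i-th digit token (front-indexed from c) taken by position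
def replFrom (nums : List String) : Nat → List String → List String
  | _, [] => []
  | c, t :: ts =>
    if PySem.Str.strIsdigit t then
      (if c < nums.length then nums.getD c t else t) :: replFrom nums (c + 1) ts
    else t :: replFrom nums c ts

theorem count_fold (ss : List String) : ∀ (a : Int),
    ss.foldl (fun acc t => acc + (if PySem.Str.strIsdigit t then 1 else 0)) a
      = a + ((ss.filter PySem.Str.strIsdigit).length : Int) := by
  induction ss with
  | nil => intro a; simp
  | cons t ts ih =>
    intro a
    simp only [List.foldl_cons, List.filter_cons]
    by_cases hd : PySem.Str.strIsdigit t
    · rw [if_pos hd, if_pos hd, ih]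
      simp only [List.length_cons]
      push_cast; ring
    · rw [if_neg hd, if_neg hd, ih]
      ring

theorem loopB (nums : List String) (ss : List String) : ∀ (c : Nat) (out0 : List String),
    ss.foldr
      (fun tok st =>
        if PySem.Str.strIsdigit tok then
          ((st.1 - 1 : Int), st.2 ++ [if st.1 - 1 < (nums.length : Int) then PySem.List.pyGetD nums (st.1 - 1) tok else tok])
        else (st.1, st.2 ++ [tok]))
      (((c + (ss.filter PySem.Str.strIsdigit).length : Nat) : Int), out0)
      = ((c : Int), out0 ++ (replFrom nums c ss).reverse) := by
  induction ss with
  | nil => intro c out0; simp [replFrom]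
  | cons t ts ih =>
    intro c out0
    by_cases hd : PySem.Str.strIsdigit t
    · have h2 := ih (c + 1) out0
      simp only [List.foldr_cons, List.filter_cons, hd, if_true, List.length_cons]
      rw [show ((c + ((ts.filter PySem.Str.strIsdigit).length + 1) : Nat) : Int)
            = (((c + 1) + (ts.filter PySem.Str.strIsdigit).length : Nat) : Int) by push_cast; ring]
      rw [h2]
      dsimp only
      push_cast
      rw [show ((c : Int) + 1 - 1) = (c : Int) by ring]
      simp only [replFrom, hd, if_true, List.reverse_cons, ← List.append_assoc]
      by_cases hc : c < nums.length
      · rw [if_pos (by exact_mod_cast hc), if_pos hc, PySem.List.pyGetD_natCast]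
      · rw [if_neg (by exact_mod_cast hc), if_neg hc]
    · have h2 := ih c out0
      simp only [List.foldr_cons, List.filter_cons, hd, Bool.false_eq_true, if_false]
      rw [h2]
      simp only [hd, Bool.false_eq_true, if_false, replFrom, List.reverse_cons,
        ← List.append_assoc]

theorem replFrom_eq_repl (nums : List String) (ss : List String) : ∀ (c : Nat),
    replFrom nums c ss = repl ss (nums.drop c) := by
  induction ss with
  | nil => intro c; simp [replFrom, repl]
  | cons t ts ih =>
    intro c
    by_cases hd : PySem.Str.strIsdigit t
    · by_cases hc : c < nums.length
      · have hdrop : nums.drop c = nums[c] :: nums.drop (c + 1) :=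
          List.drop_eq_getElem_cons hc
        simp only [replFrom, repl, hd, if_true, hc, hdrop, ih]
        simp [List.getElem?_eq_getElem hc]
      · have hdrop : nums.drop c = [] := List.drop_eq_nil_of_le (by omega)
        have hdrop' : nums.drop (c + 1) = [] := List.drop_eq_nil_of_le (by omega)
        simp only [replFrom, repl, hd, if_true, hc, if_false, hdrop, ih, hdrop']
    · simp only [replFrom, repl, hd, Bool.false_eq_true, if_false, ih]

-- ===== VERDICT (by name: the statement is the Claim_ definition above) =====
theorem adjust_number_spec : Claim_equal_adjust_number := by
  intro s1 s2 _
  unfold Spec_adjust_number adjust_number adjust_number_alt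
  simp only []
  rw [lista_eq_filter]
  set cc := PySem.Str.split₀ s1 with hcc
  set ss := PySem.Str.split₀ s2 with hss
  set nums := cc.filter PySem.Str.strIsdigit with hnums
  -- A's loop
  have hA := loopA ss [] nums
  simp only [List.nil_append, List.length_nil, Nat.cast_zero, zero_add] at hA
  -- B's loop
  rw [count_fold ss 0, List.foldl_reverse]
  have hB := loopB nums ss 0 []
  simp only [List.nil_append, Nat.zero_add] at hB
  rw [show ((0 : Int) + ((ss.filter PySem.Str.strIsdigit).length : Int))
        = (((ss.filter PySem.Str.strIsdigit).length : Nat) : Int) by ring]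
  rw [hB]
  simp only [List.reverse_reverse]
  rw [replFrom_eq_repl nums ss 0, List.drop_zero]
  by_cases hn : nums = []
  · rw [hn]
    simp only [List.reverse_nil, ne_eq, not_true_eq_false, if_false]
    rw [repl_nil]
  · rw [if_pos (by simpa using hn), hA]
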